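-- pv_equiv track=rewrite | github.com/paulklemstine/factor | v22_cf_ppt_brainstorm.py | berggren_address_to_sb_path
-- ===== SOURCE A (Python) =====
-- def berggren_address_to_sb_path(addr):
--     """Inverse of sb_path_to_berggren_address."""
--     if not addr:
--         return []
--     # Reconstruct the integer from base-3
--     bits = 0
--     for a in addr:
--         bits = bits * 3 + a
--     # Find the leading 1 and strip it
--     if bits <= 1:
--         return []
--     bl = bits.bit_length() - 1  # position of leading 1
--     path = []
--     for i in range(bl - 1, -1, -1):
--         path.append('R' if (bits >> i) & 1 else 'L')
--     return path
-- ===== SOURCE B (Python) =====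
-- def berggren_address_to_sb_path(addr):
--     """Inverse of sb_path_to_berggren_address (LSB-first extraction)."""
--     n = 0
--     for a in addr:
--         n = n * 3 + a
--     rev = []
--     while n > 1:
--         rev.append('R' if n & 1 else 'L')
--         n >>= 1
--     return rev[::-1]
-- ===== Notes on version B (the rewrite author's own statement) =====
-- stated objective: alternative
-- what changed: B keeps the base-3 Horner reconstruction but replaces the bit_length computation and top-down mask scan with an LSB-first halving loop (while n > 1: collect 'R'/'L' from n & 1, n >>= 1) followed by one reversal.
import Mathlib
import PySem

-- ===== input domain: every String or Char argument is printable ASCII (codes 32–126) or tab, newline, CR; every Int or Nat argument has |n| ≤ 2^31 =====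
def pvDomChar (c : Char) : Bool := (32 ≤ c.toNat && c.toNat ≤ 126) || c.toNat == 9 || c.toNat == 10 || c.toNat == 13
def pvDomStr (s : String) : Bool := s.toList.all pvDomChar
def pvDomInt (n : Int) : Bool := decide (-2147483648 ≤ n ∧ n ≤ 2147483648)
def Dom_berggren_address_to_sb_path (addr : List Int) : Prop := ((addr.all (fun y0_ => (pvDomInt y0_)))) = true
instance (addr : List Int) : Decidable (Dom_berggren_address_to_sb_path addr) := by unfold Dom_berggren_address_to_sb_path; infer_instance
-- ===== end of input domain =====

-- B extracts the path bits LSB-first with a halving loop and reverses at the end,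
-- instead of computing bit_length and masking positions top-down (objective: alternative decomposition).

-- ===== PORT A =====
-- Python A: Horner base-3 reconstruction, then top-down bit scan from the leading 1.
def berggren_address_to_sb_path (addr : List Int) : List String :=
  if addr = [] then []
  else
    let bits : Int := addr.foldl (fun b a => b * 3 + a) 0
    if bits ≤ 1 then []
    else
      -- bits.bit_length() - 1 (bits ≥ 2 here, so the Nat subtraction is exact)
      let bl : Nat := PySem.Int.bitLength bits - 1
      (PySem.List.pyRange ((bl : Int) - 1) (-1) (-1)).foldl
        (fun path i =>
          path ++ [if PySem.Int.band (bits >>> i.toNat) 1 ≠ 0 then "R" else "L"]) []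

-- ===== PORT B =====
-- the while-loop of Source B: while n > 1: rev.append('R' if n & 1 else 'L'); n >>= 1
def pvAltLoop (n : Int) (rev : List String) : List String :=
  if _h : n > 1 then
    pvAltLoop (n >>> (1 : Nat)) (rev ++ [if PySem.Int.band n 1 ≠ 0 then "R" else "L"])
  else rev
termination_by n.toNat
decreasing_by
  rw [Int.shiftRight_eq_div_pow]; omega

def berggren_address_to_sb_path_alt (addr : List Int) : List String :=
  let n : Int := addr.foldl (fun b a => b * 3 + a) 0
  (pvAltLoop n []).reverse      -- rev[::-1]

-- ===== PRECONDITION & SPEC =====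
def Spec_berggren_address_to_sb_path (addr : List Int) (out : List String) : Prop := out = berggren_address_to_sb_path_alt addr
instance (addr : List Int) (out : List String) : Decidable (Spec_berggren_address_to_sb_path addr out) := by unfold Spec_berggren_address_to_sb_path; infer_instance

-- ===== CLAIM (what is proved, stated in full; the proofs are below) =====
def Claim_equal_berggren_address_to_sb_path : Prop := ∀ (addr : List Int), Dom_berggren_address_to_sb_path addr → Spec_berggren_address_to_sb_path addr (berggren_address_to_sb_path addr)

-- ===== LEMMAS AND PROOFS =====

lemma pv_floordiv_two (n : Int) : PySem.Int.floordiv n 2 = n >>> (1 : Nat) := by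
  rw [Int.shiftRight_eq_div_pow]
  simp [PySem.Int.floordiv, Int.fdiv_eq_ediv]

lemma pv_shift_shift (n : Int) (k : Nat) : (n >>> (1 : Nat)) >>> k = n >>> (k + 1) := by
  simp only [Int.shiftRight_eq_div_pow]
  push_cast
  rw [Int.ediv_ediv_of_nonneg (by positivity : (0:ℤ) ≤ 2)]
  ring_nf

lemma pv_one_le_half (n : Int) (h : 2 ≤ n) : 1 ≤ n >>> (1 : Nat) := by
  rw [Int.shiftRight_eq_div_pow]; omega

lemma pv_bitLength_succ (n : Int) (h : 0 < n) :
    PySem.Int.bitLength n = PySem.Int.bitLength (n >>> (1 : Nat)) + 1 := by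
  rw [← pv_floordiv_two]
  exact PySem.Int.bitLength_of_pos h

lemma pv_foldl_app {α : Type} (g : α → String) :
    ∀ (l : List α) (init : List String),
      l.foldl (fun acc x => acc ++ [g x]) init = init ++ l.map g := by
  intro l
  induction l with
  | nil => simp
  | cons x xs ih => intro init; simp [List.foldl_cons, ih]

lemma pv_altLoop_acc :
    ∀ (m : Nat) (n : Int), n.toNat ≤ m → ∀ rev, pvAltLoop n rev = rev ++ pvAltLoop n [] := by
  intro m
  induction m with
  | zero =>
      intro n hn rev
      have hng : ¬ n > 1 := by omega
      rw [pvAltLoop]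
      simp only [hng, dif_neg, not_false_iff]
      rw [pvAltLoop]
      simp [hng]
  | succ m ih =>
      intro n hn rev
      by_cases h : n > 1
      · have hh : (n >>> (1 : Nat)).toNat ≤ m := by
          rw [Int.shiftRight_eq_div_pow]; omega
        conv_lhs => rw [pvAltLoop]
        conv_rhs => rw [pvAltLoop]
        simp only [h, dif_pos]
        conv_lhs => rw [ih _ hh]
        conv_rhs => rw [ih _ hh]
        simp
      · conv_lhs => rw [pvAltLoop]
        conv_rhs => rw [pvAltLoop]
        simp [h]

-- altLoop on n ≥ 1 produces the ascending-index bit list of n below its leading 1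
lemma pv_core :
    ∀ (m : Nat) (n : Int), 1 ≤ n → n.toNat ≤ m →
      pvAltLoop n [] =
        (List.range (PySem.Int.bitLength n - 1)).map
          (fun k : Nat => if PySem.Int.band (n >>> k) 1 ≠ 0 then "R" else "L") := by
  intro m
  induction m with
  | zero => intro n h1 h0; omega
  | succ m ih =>
      intro n h1 hm
      by_cases h : n > 1
      · have h2 : 2 ≤ n := by omega
        have hhalf : 1 ≤ n >>> (1 : Nat) := pv_one_le_half n h2
        have hmm : (n >>> (1 : Nat)).toNat ≤ m := by
          rw [Int.shiftRight_eq_div_pow] at hhalf ⊢; omega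
        rw [pvAltLoop]
        simp only [h, dif_pos]
        rw [pv_altLoop_acc m _ hmm, ih _ hhalf hmm]
        have hbl : PySem.Int.bitLength n = PySem.Int.bitLength (n >>> (1 : Nat)) + 1 :=
          pv_bitLength_succ n (by omega)
        have hbl1 : 1 ≤ PySem.Int.bitLength (n >>> (1 : Nat)) := by
          rw [pv_bitLength_succ _ (by omega : (0:ℤ) < n >>> (1 : Nat))]; omega
        rw [hbl]
        have he : PySem.Int.bitLength (n >>> (1:Nat)) + 1 - 1
            = (PySem.Int.bitLength (n >>> (1:Nat)) - 1) + 1 := by omega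
        rw [he, List.range_succ_eq_map]
        simp only [List.map_cons, List.map_map, List.nil_append, List.cons_append,
          List.nil_append]
        have h0 : n >>> (0 : Nat) = n := by
          rw [Int.shiftRight_eq_div_pow]; simp
        rw [h0]
        congr 1
        apply List.map_congr_left
        intro k _
        simp only [Function.comp_apply, Nat.succ_eq_add_one]
        rw [pv_shift_shift]
      · rw [pvAltLoop]
        have hone : n = 1 := by omega
        subst hone
        norm_num
        decide

theorem pv_equiv (addr : List Int) :
    berggren_address_to_sb_path addr = berggren_address_to_sb_path_alt addr := by
  unfold berggren_address_to_sb_path berggren_address_to_sb_path_alt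
  by_cases hnil : addr = []
  · subst hnil
    simp only [List.foldl_nil]
    rw [pvAltLoop]; simp
  · simp only [hnil, ite_false]
    set bits : Int := addr.foldl (fun b a => b * 3 + a) 0 with hb
    by_cases hle : bits ≤ 1
    · simp only [hle, if_pos]
      rw [pvAltLoop]
      have : ¬ bits > 1 := by omega
      simp [this]
    · simp only [hle, ite_false]
      rw [pv_core bits.toNat bits (by omega) (le_refl _)]
      rw [pv_foldl_app]
      rw [PySem.List.pyRange_neg_one_eq_reverse]
      have e1 : (-1 : Int) + 1 = 0 := by norm_num
      have e2 : ((PySem.Int.bitLength bits - 1 : Nat) : Int) - 1 + 1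
          = ((PySem.Int.bitLength bits - 1 : Nat) : Int) := by ring
      rw [e1, e2, PySem.List.pyRange_one]
      simp only [Int.sub_zero, Int.toNat_natCast, List.map_map, List.map_reverse,
        List.nil_append]
      congr 1
      apply List.map_congr_left
      intro k _
      simp [Int.shiftRight_natCast_right]

-- ===== VERDICT (by name: the statement is the Claim_ definition above) =====
theorem berggren_address_to_sb_path_spec : Claim_equal_berggren_address_to_sb_path := by
  intro addr _
  unfold Spec_berggren_address_to_sb_path
  exact pv_equiv addr
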